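-- pv_equiv track=rewrite | github.com/michaely-cb/cluster-cp | src/cluster-deployment/deployment/deployment_manager/tools/switch/utils.py | interface_sort_key
-- ===== SOURCE A (Python) =====
-- def interface_sort_key(inf: str) -> str:
--     """
--     Normalize the port numbering for better sort ordering, e.g.
--     sort(Ethernet1/1, Ethernet11/1, Ethernet2/1) -> Ethernet1/1, Ethernet2/1, Ethernet11/1
--     """
--     spans, span = [], -1
--     for c in inf:
--         i = ord(c) - ord("0")
--         if 0 <= i < 10:
--             span = i if span == -1 else span * 10 + i
--         elif span > -1:
--             spans.append(span)
--             span = -1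
--     if span > -1:
--         spans.append(span)
--     return ":".join([f"{d:05}" for d in spans])
-- ===== SOURCE B (Python) =====
-- def interface_sort_key(inf: str) -> str:
--     """
--     Normalize the port numbering for better sort ordering, e.g.
--     sort(Ethernet1/1, Ethernet11/1, Ethernet2/1) -> Ethernet1/1, Ethernet2/1, Ethernet11/1
--     """
--     spans = []
--     i, n = 0, len(inf)
--     while i < n:
--         if "0" <= inf[i] <= "9":
--             j = i
--             while j < n and "0" <= inf[j] <= "9":
--                 j += 1
--             spans.append(int(inf[i:j]))
--             i = j
--         else:
--             i += 1
--     return ":".join(f"{d:05}" for d in spans)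
-- ===== Notes on version B (the rewrite author's own statement) =====
-- stated objective: alternative
-- what changed: Replaced the per-character accumulator loop with the -1 sentinel and end-of-string flush by an index-based tokenizer that scans each maximal ASCII-digit run, converts the slice with int(), and never needs a sentinel or a final flush.
import Mathlib
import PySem

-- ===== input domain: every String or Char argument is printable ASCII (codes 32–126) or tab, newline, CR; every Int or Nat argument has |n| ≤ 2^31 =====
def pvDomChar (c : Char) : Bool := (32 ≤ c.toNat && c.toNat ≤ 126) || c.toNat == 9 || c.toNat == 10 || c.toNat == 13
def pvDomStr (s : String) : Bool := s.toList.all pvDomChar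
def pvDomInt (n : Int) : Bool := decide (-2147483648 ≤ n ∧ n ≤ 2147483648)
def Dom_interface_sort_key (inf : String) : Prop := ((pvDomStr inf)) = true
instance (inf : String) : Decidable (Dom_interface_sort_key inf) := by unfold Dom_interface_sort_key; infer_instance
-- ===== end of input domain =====

-- B replaces A's sentinel-accumulator character loop by an index-based digit-run tokenizer; alternative decomposition, same cost.

-- f"{d:05}" for the nonnegative span values both programs produce (zero-pad to width 5)
def pvPad5 (d : Int) : String :=
  let s := (PySem.Int.toStr d).toList
  String.mk (List.replicate (5 - s.length) '0' ++ s)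

-- ===== PORT A =====
def pvStepA (p : List Int × Int) (c : Char) : List Int × Int :=
  let i : Int := (c.toNat : Int) - 48
  if 0 ≤ i ∧ i < 10 then
    (p.1, if p.2 = -1 then i else p.2 * 10 + i)
  else if p.2 > -1 then
    (p.1 ++ [p.2], -1)
  else p

def interface_sort_key (inf : String) : String :=
  let st := inf.toList.foldl pvStepA ([], -1)
  let spans := if st.2 > -1 then st.1 ++ [st.2] else st.1
  PySem.Str.join ":" (spans.map pvPad5)

-- ===== PORT B =====
def pvIsDig (c : Char) : Bool := 48 ≤ c.toNat && c.toNat ≤ 57   -- "0" <= c <= "9"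

-- the maximal digit runs, in order (Source B's outer while with the inner run scan)
def pvRuns : List Char → List (List Char)
  | [] => []
  | c :: cs =>
    if pvIsDig c then
      (c :: cs.takeWhile pvIsDig) :: pvRuns (cs.dropWhile pvIsDig)
    else
      pvRuns cs
termination_by l => l.length
decreasing_by
  · have := List.length_dropWhile_le pvIsDig cs
    simp; omega
  · simp

-- int() on a nonempty ASCII digit string (exact there; Source B only calls int on such slices)
def pvVal (ds : List Char) : Int :=
  ds.foldl (fun a c => a * 10 + ((c.toNat : Int) - 48)) 0

def interface_sort_key_alt (inf : String) : String :=
  PySem.Str.join ":" ((pvRuns inf.toList).map (fun r => pvPad5 (pvVal r)))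

-- ===== PRECONDITION & SPEC =====
def Spec_interface_sort_key (inf : String) (out : String) : Prop := out = interface_sort_key_alt inf
instance (inf : String) (out : String) : Decidable (Spec_interface_sort_key inf out) := by unfold Spec_interface_sort_key; infer_instance

-- ===== CLAIM (what is proved, stated in full; the proofs are below) =====
def Claim_equal_interface_sort_key : Prop := ∀ (inf : String), Dom_interface_sort_key inf → Spec_interface_sort_key inf (interface_sort_key inf)

-- ===== LEMMAS AND PROOFS =====

def pvFinish (st : List Int × Int) : List Int := if st.2 > -1 then st.1 ++ [st.2] else st.1

lemma pvStepA_dig (p : List Int × Int) (c : Char) (h : pvIsDig c = true) :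
    pvStepA p c = (p.1, if p.2 = -1 then ((c.toNat : Int) - 48) else p.2 * 10 + ((c.toNat : Int) - 48)) := by
  simp [pvIsDig] at h
  simp [pvStepA]
  omega

lemma pvStepA_nondig (p : List Int × Int) (c : Char) (h : pvIsDig c = false) :
    pvStepA p c = if p.2 > -1 then (p.1 ++ [p.2], -1) else p := by
  simp [pvIsDig] at h
  simp only [pvStepA]
  rw [if_neg]
  omega

-- the combined invariant: out-of-run state (left) and in-run state (right)
lemma pvKey : ∀ n (l : List Char), l.length ≤ n →
    (∀ spans : List Int,
       pvFinish (l.foldl pvStepA (spans, -1)) = spans ++ (pvRuns l).map pvVal)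
    ∧ (∀ (spans : List Int) (v : Int), 0 ≤ v →
       pvFinish (l.foldl pvStepA (spans, v))
         = spans ++ [(l.takeWhile pvIsDig).foldl (fun a c => a * 10 + ((c.toNat : Int) - 48)) v]
             ++ (pvRuns (l.dropWhile pvIsDig)).map pvVal) := by
  intro n
  induction n with
  | zero =>
    intro l hl
    have : l = [] := List.length_eq_zero_iff.mp (Nat.le_zero.mp hl)
    subst this
    constructor
    · intro spans; simp [pvFinish, pvRuns]
    · intro spans v hv; simp [pvFinish, pvRuns]; omega
  | succ n ih =>
    intro l hl
    cases l with
    | nil =>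
      constructor
      · intro spans; simp [pvFinish, pvRuns]
      · intro spans v hv; simp [pvFinish, pvRuns]; omega
    | cons c cs =>
      simp only [List.length_cons, Nat.succ_le_succ_iff] at hl
      by_cases hc : pvIsDig c = true
      · constructor
        · intro spans
          rw [List.foldl_cons, pvStepA_dig _ _ hc]
          simp only [if_true]
          have hdw : (cs.dropWhile pvIsDig).length ≤ n :=
            le_trans (List.length_dropWhile_le pvIsDig cs) hl
          have h2 := (ih cs hl).2 spans ((c.toNat : Int) - 48) (by
            simp [pvIsDig] at hc; omega)
          rw [h2]
          rw [pvRuns, if_pos hc]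
          simp [pvVal]
        · intro spans v hv
          rw [List.foldl_cons, pvStepA_dig _ _ hc]
          rw [if_neg (by omega)]
          have h2 := (ih cs hl).2 spans (v * 10 + ((c.toNat : Int) - 48)) (by
            simp [pvIsDig] at hc; omega)
          rw [h2]
          rw [List.takeWhile_cons_of_pos hc, List.dropWhile_cons_of_pos hc]
          simp
      · have hc' : pvIsDig c = false := by simpa using hc
        constructor
        · intro spans
          rw [List.foldl_cons, pvStepA_nondig _ _ hc']
          rw [if_neg (by omega)]
          rw [(ih cs hl).1 spans]
          rw [pvRuns, if_neg hc]
        · intro spans v hv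
          rw [List.foldl_cons, pvStepA_nondig _ _ hc']
          rw [if_pos (by omega)]
          rw [(ih cs hl).1 (spans ++ [v])]
          rw [List.takeWhile_cons_of_neg (by simp [hc']), List.dropWhile_cons_of_neg (by simp [hc'])]
          rw [pvRuns, if_neg hc]
          simp

-- ===== VERDICT (by name: the statement is the Claim_ definition above) =====
theorem interface_sort_key_spec : Claim_equal_interface_sort_key := by
  intro inf _
  unfold Spec_interface_sort_key interface_sort_key interface_sort_key_alt
  have h := (pvKey inf.toList.length inf.toList le_rfl).1 []
  simp only [pvFinish] at h
  simp only [h, List.nil_append, List.map_map]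
  rfl
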